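-- pv_equiv track=rewrite | github.com/antonio-leitao/tinydocs | tinydocs/transformer.py | examples_doc
-- ===== SOURCE A (Python) =====
-- from itertools import groupby
--
-- def examples_doc(examples: list) -> str:
--     docstring = "\n"
--     examples = [
--         list(group) for k, group in groupby(examples, lambda x: x == "") if not k
--     ]
--     for example in examples:
--         if example[0].startswith(">>>"):
--             example = "\n".join(example)
--             docstring += f"```python\n{example}\n```\n"
--         else:
--             example = "\n".join(example)
--             docstring += f"\n{example}\n"
--     return docstring
-- ===== SOURCE B (Python) =====
-- def examples_doc(examples: list) -> str:
--     pieces = ["\n"]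
--     fence = False
--     prev = ""
--     for line, nxt in zip(examples, examples[1:] + [""]):
--         if line != "":
--             if prev == "":
--                 fence = line.startswith(">>>")
--                 pieces.append("```python\n" if fence else "\n")
--             pieces.append(line)
--             pieces.append(("\n```\n" if fence else "\n") if nxt == "" else "\n")
--         prev = line
--     return "".join(pieces)
-- ===== Notes on version B (the rewrite author's own statement) =====
-- stated objective: alternative
-- what changed: B never materialises groups: a single streaming pass pairs each line with its successor (end-padded), detects block starts/ends from the neighbouring lines, emits opener/line/closer pieces directly into a piece list and joins once at the end, instead of A's groupby-precompute-then-per-group-format.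
import Mathlib
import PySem

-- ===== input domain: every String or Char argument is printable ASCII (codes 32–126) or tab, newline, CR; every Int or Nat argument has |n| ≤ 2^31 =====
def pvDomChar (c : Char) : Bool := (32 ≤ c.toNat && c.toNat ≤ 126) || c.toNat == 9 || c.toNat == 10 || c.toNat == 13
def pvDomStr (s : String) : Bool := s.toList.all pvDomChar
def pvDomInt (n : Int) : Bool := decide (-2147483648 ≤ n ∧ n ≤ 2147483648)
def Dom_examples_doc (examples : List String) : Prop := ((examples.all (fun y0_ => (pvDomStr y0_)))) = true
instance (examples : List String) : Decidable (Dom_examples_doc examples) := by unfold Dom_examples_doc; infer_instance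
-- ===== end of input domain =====

-- B never materialises groups: one streaming pass over (line, next-line) pairs detects block
-- boundaries from the neighbours and emits opener/line/closer pieces directly, joined once at
-- the end — instead of A's groupby-precompute-then-format (objective: alternative, same cost).

-- ===== PORT A =====
-- itertools.groupby(examples, lambda x: x == ""): maximal runs of lines with equal key.
def pyGroupby : List String → List (Bool × List String)
  | [] => []
  | x :: xs =>
      let k := x == ""
      (k, x :: xs.takeWhile (fun y => (y == "") == k)) ::
        pyGroupby (xs.dropWhile (fun y => (y == "") == k))
termination_by l => l.length
decreasing_by
  exact Nat.lt_succ_of_le (List.length_dropWhile_le _ _)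

-- the body of A's for-loop: format one group (group[0].startswith(">>>") chooses the fence).
def fmtGroup (g : List String) : String :=
  if PySem.Str.startswith ((PySem.List.pyGet? g 0).getD "") ">>>" then
    "```python\n" ++ PySem.Str.join "\n" g ++ "\n```\n"
  else
    "\n" ++ PySem.Str.join "\n" g ++ "\n"

def examples_doc (examples : List String) : String :=
  let gs := (pyGroupby examples).filterMap (fun kg => if kg.1 then none else some kg.2)
  gs.foldl (fun doc g => doc ++ fmtGroup g) "\n"

-- ===== PORT B =====
-- state = (pieces, fence, prev); iterated over zip(examples, examples[1:] + [""]).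
def bStep (st : List String × Bool × String) (ln : String × String) :
    List String × Bool × String :=
  let pieces := st.1; let fence := st.2.1; let prev := st.2.2
  let line := ln.1; let nxt := ln.2
  if line == "" then (pieces, fence, line)
  else
    let pf : List String × Bool :=
      if prev == "" then
        let f := PySem.Str.startswith line ">>>"
        (pieces ++ [if f then "```python\n" else "\n"], f)
      else (pieces, fence)
    (pf.1 ++ [line] ++ [if nxt == "" then (if pf.2 then "\n```\n" else "\n") else "\n"],
      pf.2, line)

def examples_doc_alt (examples : List String) : String :=
  let st := (examples.zip (examples.drop 1 ++ [""])).foldl bStep (["\n"], false, "")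
  PySem.Str.join "" st.1

-- ===== PRECONDITION & SPEC =====
def Spec_examples_doc (examples : List String) (out : String) : Prop := out = examples_doc_alt examples
instance (examples : List String) (out : String) : Decidable (Spec_examples_doc examples out) := by unfold Spec_examples_doc; infer_instance

-- ===== CLAIM (what is proved, stated in full; the proofs are below) =====
def Claim_equal_examples_doc : Prop := ∀ (examples : List String), Dom_examples_doc examples → Spec_examples_doc examples (examples_doc examples)

-- ===== LEMMAS AND PROOFS =====

-- A's group list (the list comprehension over groupby).
def GA (l : List String) : List (List String) :=
  (pyGroupby l).filterMap (fun kg => if kg.1 then none else some kg.2)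

-- concatenation of the formatted groups
def C : List (List String) → String
  | [] => ""
  | g :: gs => fmtGroup g ++ C gs

theorem GA_nil : GA [] = [] := by simp [GA, pyGroupby]

theorem GA_cons_empty (xs : List String) :
    GA ("" :: xs) = GA (xs.dropWhile (fun y => y == "")) := by
  rw [GA, pyGroupby]
  simp [GA]

theorem GA_cons_ne (x : String) (xs : List String) (h : ¬ x = "") :
    GA (x :: xs) = (x :: xs.takeWhile (fun y => !(y == ""))) ::
      GA (xs.dropWhile (fun y => !(y == ""))) := by
  rw [GA, pyGroupby]
  have hk : (x == "") = false := by simpa using h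
  simp [GA, hk]

theorem GA_dropWhile (l : List String) :
    GA (l.dropWhile (fun y => y == "")) = GA l := by
  induction l with
  | nil => rfl
  | cons x xs ih =>
    by_cases hx : x = ""
    · subst hx
      rw [List.dropWhile_cons]
      simp only [beq_self_eq_true, if_true]
      rw [GA_cons_empty]
    · have : (x == "") = false := by simpa using hx
      rw [List.dropWhile_cons]
      simp [this]

theorem GA_cons_empty' (xs : List String) : GA ("" :: xs) = GA xs := by
  rw [GA_cons_empty, GA_dropWhile]

theorem foldl_C (gs : List (List String)) :
    ∀ s : String, gs.foldl (fun d g => d ++ fmtGroup g) s = s ++ C gs := by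
  induction gs with
  | nil => intro s; simp [C, String.append_empty]
  | cons g gs ih =>
    intro s
    simp only [List.foldl_cons, C, ih, String.append_assoc]

theorem examples_doc_eq_C (l : List String) :
    examples_doc l = "\n" ++ C (GA l) := by
  rw [examples_doc]
  exact foldl_C _ _

-- "".join of pieces, one piece at a time
def J : List String → String
  | [] => ""
  | s :: r => s ++ J r

theorem J_append (p q : List String) : J (p ++ q) = J p ++ J q := by
  induction p with
  | nil => simp [J]
  | cons s p ih => simp [J, ih, String.append_assoc]

theorem join_empty_eq_J (l : List String) : PySem.Str.join "" l = J l := by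
  induction l with
  | nil => simp [PySem.Str.join, PySem.Chars.join_nil, J]
  | cons s r ih =>
    cases r with
    | nil =>
      rw [PySem.Str.join]
      simp [PySem.Chars.join_singleton, J, String.append_empty]
    | cons t r =>
      rw [J, ← ih, PySem.Str.join, PySem.Str.join, List.map_cons, List.map_cons]
      have : ("" : String).toList = [] := rfl
      rw [this, PySem.Chars.join_cons_cons]
      simp [String.ofList_append]

-- "\n"-join written as head + tail pieces
def TailStr : List String → String
  | [] => ""
  | s :: r => "\n" ++ s ++ TailStr r

theorem join_nl (x : String) (l : List String) :
    PySem.Str.join "\n" (x :: l) = x ++ TailStr l := by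
  induction l generalizing x with
  | nil =>
    rw [PySem.Str.join]
    simp [PySem.Chars.join_singleton, TailStr, String.append_empty]
  | cons y r ih =>
    have key : PySem.Str.join "\n" (x :: y :: r)
        = x ++ ("\n" ++ PySem.Str.join "\n" (y :: r)) := by
      rw [PySem.Str.join, PySem.Str.join, List.map_cons, List.map_cons,
        PySem.Chars.join_cons_cons]
      have h2 : ∀ L : List Char, String.ofList ('\n' :: L) = "\n" ++ String.ofList L := by
        intro L
        rw [show ('\n' :: L) = ['\n'] ++ L from rfl, String.ofList_append]
      simp [String.ofList_append, h2]
    rw [key, ih y, TailStr]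
    simp [String.append_assoc]

-- fmtGroup of a non-empty group, split into the pieces B emits
theorem fmtGroup_cons (x : String) (l : List String) :
    fmtGroup (x :: l) =
      (if PySem.Str.startswith x ">>>" = true then "```python\n" else "\n")
        ++ x ++ TailStr l
        ++ (if PySem.Str.startswith x ">>>" = true then "\n```\n" else "\n") := by
  rw [fmtGroup]
  have h0 : (PySem.List.pyGet? (x :: l) 0).getD "" = x := by
    simp [PySem.List.pyGet?, PySem.List.pyIdx?]
  rw [h0, join_nl]
  by_cases hs : PySem.Str.startswith x ">>>" = true
  · rw [if_pos hs, if_pos hs, if_pos hs]; simp [String.append_assoc]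
  · rw [if_neg hs, if_neg hs, if_neg hs]; simp [String.append_assoc]

-- what remains of B's output while inside a block with fence flag f
def Body (f : Bool) : List String → String
  | [] => ""
  | x :: rest =>
      if x == "" then C (GA (x :: rest))
      else x ++ (if rest.headD "" == "" then (if f then "\n```\n" else "\n") else "\n")
             ++ Body f rest

-- the pending separator plus the rest of the block, as A would print it
theorem sep_Body (f : Bool) (rest : List String) :
    (if rest.headD "" == "" then (if f then "\n```\n" else "\n") else "\n") ++ Body f rest
      = TailStr (rest.takeWhile (fun y => !(y == ""))) ++ (if f then "\n```\n" else "\n") ++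
        C (GA (rest.dropWhile (fun y => !(y == "")))) := by
  induction rest with
  | nil => simp [Body, TailStr, GA_nil, C, String.append_empty]
  | cons y r ih =>
    by_cases hy : y = ""
    · subst hy
      simp [Body, TailStr, GA_cons_empty']
    · have hyb : (y == "") = false := by simpa using hy
      rw [List.takeWhile_cons, List.dropWhile_cons]
      simp only [hyb, Bool.not_false, if_true, List.headD_cons, if_false, Bool.false_eq_true]
      rw [Body]
      simp only [hyb, if_false, Bool.false_eq_true]
      rw [String.append_assoc, ih]
      rw [TailStr]
      simp [String.append_assoc]

theorem zip_unfold (x : String) (xs : List String) :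
    (x :: xs).zip ((x :: xs).drop 1 ++ [""]) =
      (x, xs.headD "") :: xs.zip (xs.drop 1 ++ [""]) := by
  cases xs <;> simp

-- main loop invariant: both the outside-a-block and the inside-a-block shape at once
theorem loop_inv (xs : List String) :
    (∀ (pieces : List String) (f : Bool),
        J (((xs.zip (xs.drop 1 ++ [""])).foldl bStep (pieces, f, "")).1)
          = J pieces ++ C (GA xs)) ∧
    (∀ (pieces : List String) (f : Bool) (p : String), p ≠ "" →
        J (((xs.zip (xs.drop 1 ++ [""])).foldl bStep (pieces, f, p)).1)
          = J pieces ++ Body f xs) := by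
  induction xs with
  | nil =>
    refine ⟨?_, ?_⟩ <;> intros <;>
      simp [GA_nil, C, Body, String.append_empty]
  | cons x xs ih =>
    have step_out : ∀ (pieces : List String) (f : Bool),
        J (((( x :: xs).zip ((x :: xs).drop 1 ++ [""])).foldl bStep (pieces, f, "")).1)
          = J pieces ++ C (GA (x :: xs)) := by
      intro pieces f
      rw [zip_unfold, List.foldl_cons]
      by_cases hx : x = ""
      · subst hx
        have : bStep (pieces, f, "") ("", xs.headD "") = (pieces, f, "") := by
          simp [bStep]
        rw [this, ih.1, GA_cons_empty']
      · have hxb : (x == "") = false := by simpa using hx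
        have hb : bStep (pieces, f, "") (x, xs.headD "") =
            (pieces ++ [if PySem.Str.startswith x ">>>" = true then "```python\n" else "\n"]
              ++ [x] ++ [if xs.headD "" == "" then
                    (if PySem.Str.startswith x ">>>" = true then "\n```\n" else "\n")
                  else "\n"],
             PySem.Str.startswith x ">>>", x) := by
          simp only [bStep, hxb]
          rfl
        rw [hb, ih.2 _ _ x hx]
        rw [GA_cons_ne x xs hx, C, fmtGroup_cons]
        rw [J_append, J_append, J_append]
        simp only [J, String.append_empty]
        simp only [String.append_assoc]
        rw [sep_Body]
        simp [String.append_assoc]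
    refine ⟨step_out, ?_⟩
    intro pieces f p hp
    rw [zip_unfold, List.foldl_cons]
    by_cases hx : x = ""
    · subst hx
      have : bStep (pieces, f, p) ("", xs.headD "") = (pieces, f, "") := by
        simp [bStep]
      rw [this, ih.1]
      rw [Body]
      simp [GA_cons_empty']
    · have hxb : (x == "") = false := by simpa using hx
      have hpb : (p == "") = false := by simpa using hp
      have hb : bStep (pieces, f, p) (x, xs.headD "") =
          (pieces ++ [x] ++ [if xs.headD "" == "" then (if f then "\n```\n" else "\n")
              else "\n"],
           f, x) := by
        simp [bStep, hxb, hpb]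
      rw [hb, ih.2 _ _ x hx]
      rw [Body]
      simp only [hxb, if_false, Bool.false_eq_true]
      rw [J_append, J_append]
      simp only [J, String.append_empty]
      simp [String.append_assoc]

-- ===== VERDICT (by name: the statement is the Claim_ definition above) =====
theorem examples_doc_spec : Claim_equal_examples_doc := by
  intro l _
  unfold Spec_examples_doc
  rw [examples_doc_eq_C, examples_doc_alt]
  show "\n" ++ C (GA l) = _
  rw [join_empty_eq_J, (loop_inv l).1 ["\n"] false]
  simp [J, String.append_empty]
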